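-- pv_equiv track=rewrite | github.com/alainpetit21/CTF_AOC2024 | D7C2/src/ChallengeDay7C2.py | convert_operator
-- ===== SOURCE A (Python) =====
-- def convert_operator(operator, nb_element, base):
--     # Step 1: Convert the number to the specified base
--     digits = []
--     while operator > 0:
--         digits.append(operator % base)
--         operator //= base
--
--     # If the number is 0, represent it as a single '0' digit
--     if not digits:
--         digits = [0]
--
--     # Reverse the digits to get the correct base representation
--     base_representation = ''.join(map(str, reversed(digits)))
--
--     # Step 2: Pad the base string to the desired length
--     padded_base_string = base_representation.zfill(nb_element)
--
--     # Step 3: Replace each digit with custom symbols (e.g., '*' for 1, '+' for 0)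
--     # You can define your own mapping
--     custom_mapping = {'0': '+', '1': '*', '2': '|'}
--     custom_string = ''.join(custom_mapping[digit] for digit in padded_base_string)
--
--     return list(custom_string)
-- ===== SOURCE B (Python) =====
-- def convert_operator(operator, nb_element, base):
--     # Treat operator <= 0 as the single digit 0: the whole output is pad symbols.
--     if operator <= 0:
--         return ['+'] * max(nb_element, 1)
--     # Number of base-digits of operator: smallest n >= 1 with base ** n > operator.
--     ndigits = 1
--     while base ** ndigits <= operator:
--         ndigits += 1
--     symbols = {0: '+', 1: '*', 2: '|'}
--     span = max(nb_element, ndigits)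
--     return [symbols[(operator // base ** i) % base] for i in range(span - 1, -1, -1)]
-- ===== Notes on version B (the rewrite author's own statement) =====
-- stated objective: alternative
-- what changed: B replaces A's repeated-divmod digit accumulation, list reversal, string join and zfill by computing the output width as max(nb_element, digit count) and extracting each digit positionally as (operator // base**i) % base from the most significant position down.
-- outside the precondition, e.g. on convert_operator(10, 1, 16): A returns ['*', '+'], B raises KeyError; on convert_operator(4, 1, -2): A returns ['+'], B raises KeyError; on convert_operator(5, 2, -1): A returns ['+', '+'], B does not finish within the time limit
import Mathlib
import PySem

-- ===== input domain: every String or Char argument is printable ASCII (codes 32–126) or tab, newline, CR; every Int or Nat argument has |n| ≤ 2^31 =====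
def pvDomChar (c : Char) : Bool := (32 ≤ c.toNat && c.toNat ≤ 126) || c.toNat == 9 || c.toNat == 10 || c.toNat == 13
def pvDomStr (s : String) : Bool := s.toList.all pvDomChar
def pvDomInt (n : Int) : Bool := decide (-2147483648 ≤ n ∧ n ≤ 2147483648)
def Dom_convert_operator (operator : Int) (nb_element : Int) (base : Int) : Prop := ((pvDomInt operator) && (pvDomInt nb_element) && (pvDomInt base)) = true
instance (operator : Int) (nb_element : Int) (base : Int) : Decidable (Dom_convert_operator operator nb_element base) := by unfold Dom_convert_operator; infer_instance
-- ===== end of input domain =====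

-- B rewrites A by extracting each digit directly as (operator // base**i) % base from the most
-- significant position down — no reversed digit list, no string join, no zfill (objective: alternative decomposition).

-- ===== PORT A =====
-- while operator > 0: digits.append(operator % base); operator //= base
-- (fuel-guarded recursion; under Pre_ the loop runs at most 32 times, fuel 64 is a totality guard only)
def aLoop (base : Int) : Nat → Int → List Int
  | 0, _ => []
  | f + 1, op =>
    if 0 < op then PySem.Int.mod op base :: aLoop base f (PySem.Int.floordiv op base) else []

-- custom_mapping[c] for c a key of {'0': '+', '1': '*', '2': '|'}; on any other character Python
-- raises KeyError — exactly those inputs are excluded by Pre_, so the fallback branch is never taken there.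
def aSym (c : Char) : String :=
  if c = '0' then "+" else if c = '1' then "*" else "|"

def convert_operator (operator : Int) (nb_element : Int) (base : Int) : List String :=
  let digits := aLoop base 64 operator
  let digits := if digits = [] then [0] else digits
  -- ''.join(map(str, reversed(digits)))
  let base_representation : List Char := (digits.reverse.map PySem.Int.toChars).flatten
  -- base_representation.zfill(nb_element)
  let padded := PySem.Chars.zfill base_representation nb_element
  -- list(''.join(custom_mapping[digit] for digit in padded)): each mapped symbol is a single
  -- character, so joining and re-listing is exactly this character-wise map.
  padded.map aSym

-- ===== PORT B =====
-- ndigits = 1; while base ** ndigits <= operator: ndigits += 1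
-- (fuel-guarded; under Pre_ at most 32 steps, fuel 64 is a totality guard only)
def bNdigits (operator base : Int) : Nat → Nat → Nat
  | 0, n => n
  | f + 1, n => if base ^ n ≤ operator then bNdigits operator base f (n + 1) else n

-- symbols[d] for d a key of {0: '+', 1: '*', 2: '|'}; any other digit raises KeyError in Python —
-- excluded by Pre_, so the fallback branch is never taken there.
def bSym (d : Int) : String :=
  if d = 0 then "+" else if d = 1 then "*" else "|"

def convert_operator_alt (operator : Int) (nb_element : Int) (base : Int) : List String :=
  if operator ≤ 0 then List.replicate (max nb_element 1).toNat "+"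
  else
    let ndigits := bNdigits operator base 64 1
    let span := max nb_element (ndigits : Int)
    -- [symbols[(operator // base ** i) % base] for i in range(span - 1, -1, -1)]
    -- (every i produced by this range is ≥ 0, so i.toNat is exact for base ** i)
    (PySem.List.pyRange (span - 1) (-1) (-1)).map (fun i =>
      bSym (PySem.Int.mod (PySem.Int.floordiv operator (base ^ i.toNat)) base))

-- ===== PRECONDITION & SPEC =====
-- Pre_ excludes positive operators whose base representation contains a digit ≥ 3 (A raises
-- KeyError there, except when the digit's DECIMAL spelling happens to use only '0'/'1'/'2' —
-- e.g. a digit 10 — where A returns an accidental multi-symbol expansion of that single digit),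
-- and positive operators with base < 2, where A's loop raises (base 0), diverges (base 1) or
-- stops early on a negative quotient and returns an accidental all-padding value; B raises
-- KeyError or diverges on those inputs.  The bound 32 covers every digit position, since
-- Dom bounds operator by 2^31 < base^32 for base ≥ 2.
def Pre_convert_operator (operator : Int) (nb_element : Int) (base : Int) : Prop :=
  operator ≤ 0 ∨
    (2 ≤ base ∧ ∀ i ∈ List.range 32,
      PySem.Int.mod (PySem.Int.floordiv operator (base ^ i)) base < 3)

instance (operator : Int) (nb_element : Int) (base : Int) : Decidable (Pre_convert_operator operator nb_element base) := by
  unfold Pre_convert_operator; infer_instance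

def pvWitness_convert_operator : Int × Int × Int := (11, 5, 3)

def Spec_convert_operator (operator : Int) (nb_element : Int) (base : Int) (out : List String) : Prop := out = convert_operator_alt operator nb_element base
instance (operator : Int) (nb_element : Int) (base : Int) (out : List String) : Decidable (Spec_convert_operator operator nb_element base out) := by unfold Spec_convert_operator; infer_instance

-- ===== CLAIM (what is proved, stated in full; the proofs are below) =====
def Claim_equal_convert_operator : Prop := ∀ (operator : Int) (nb_element : Int) (base : Int), Dom_convert_operator operator nb_element base → Pre_convert_operator operator nb_element base → Spec_convert_operator operator nb_element base (convert_operator operator nb_element base)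

-- ===== LEMMAS AND PROOFS =====

def pdig (op base : Int) (i : Nat) : Int :=
  PySem.Int.mod (PySem.Int.floordiv op (base ^ i)) base

-- bNdigits characterization

theorem bN_spec (op base : Int) (hb : 2 ≤ base) :
    ∀ (f n : Nat), 1 ≤ n → base ^ (n - 1) ≤ op → op < base ^ (n - 1 + f) →
      n ≤ bNdigits op base f n ∧
      base ^ (bNdigits op base f n - 1) ≤ op ∧ op < base ^ (bNdigits op base f n) := by
  intro f
  induction f with
  | zero =>
    intro n h1 h2 h3
    simp only [Nat.add_zero] at h3
    exact absurd h2 (not_le.mpr h3)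
  | succ f ih =>
    intro n h1 h2 h3
    unfold bNdigits
    by_cases h : base ^ n ≤ op
    · rw [if_pos h]
      have := ih (n + 1) (by omega) (by simpa using h)
        (by
          have : n + 1 - 1 + f = n - 1 + (f + 1) := by omega
          rw [this]; exact h3)
      exact ⟨by omega, this.2.1, this.2.2⟩
    · rw [if_neg h]
      exact ⟨le_refl n, h2, not_le.mp h⟩

theorem nd_unique (op base : Int) (hb : 2 ≤ base) {m n : Nat}
    (hm1 : 1 ≤ m) (hn1 : 1 ≤ n)
    (h1 : base ^ (m - 1) ≤ op) (h2 : op < base ^ m)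
    (h3 : base ^ (n - 1) ≤ op) (h4 : op < base ^ n) : m = n := by
  have hb1 : (1:Int) ≤ base := by omega
  rcases lt_trichotomy m n with h | h | h
  · have : base ^ m ≤ base ^ (n - 1) := pow_le_pow_right₀ hb1 (by omega)
    exfalso; omega
  · exact h
  · have : base ^ n ≤ base ^ (m - 1) := pow_le_pow_right₀ hb1 (by omega)
    exfalso; omega

theorem aLoop_zero (base : Int) : ∀ g, aLoop base g 0 = [] := by
  intro g; cases g <;> simp [aLoop]

theorem aLoop_nonpos (base op : Int) (h : op ≤ 0) : ∀ g, aLoop base g op = [] := by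
  intro g; cases g with
  | zero => rfl
  | succ f => unfold aLoop; rw [if_neg (by omega)]

theorem pdig_zero (op base : Int) (hb : 2 ≤ base) : pdig op base 0 = PySem.Int.mod op base := by
  simp [pdig, PySem.Int.floordiv_eq_ediv_of_pos (by omega : (0:Int) < 1)]

theorem pdig_succ (op base : Int) (hb : 2 ≤ base) (i : Nat) :
    pdig op base (i + 1) = pdig (PySem.Int.floordiv op base) base i := by
  unfold pdig
  congr 1
  rw [PySem.Int.floordiv_eq_ediv_of_pos (by positivity : (0:Int) < base ^ i),
      PySem.Int.floordiv_eq_ediv_of_pos (by omega : (0:Int) < base),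
      PySem.Int.floordiv_eq_ediv_of_pos (by positivity : (0:Int) < base ^ (i+1)),
      Int.ediv_ediv_of_nonneg (by omega : (0:Int) ≤ base), ← pow_succ']

theorem aLoop_eq (base : Int) (hb : 2 ≤ base) :
    ∀ (f : Nat) (op : Int) (g : Nat), 0 < op → op < base ^ f → f ≤ g → f ≤ 64 →
      aLoop base g op = (List.range (bNdigits op base 64 1)).map (pdig op base) := by
  intro f
  induction f with
  | zero => intro op g h1 h2 _ _; exfalso; simp at h2; omega
  | succ f ih =>
    intro op g h1 h2 hg h64
    obtain ⟨g', rfl⟩ : ∃ g'', g = g'' + 1 := ⟨g - 1, by omega⟩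
    unfold aLoop
    rw [if_pos h1]
    have hb1 : (1:Int) ≤ base := by omega
    have hop64 : op < base ^ 64 := lt_of_lt_of_le h2 (pow_le_pow_right₀ hb1 (by omega))
    have hch := bN_spec op base hb 64 1 (le_refl 1) (by simpa using h1) (by simpa using hop64)
    by_cases hlt : op < base
    · have hfd : PySem.Int.floordiv op base = 0 := by
        have h0 : PySem.Int.floordiv op base < 1 :=
          (PySem.Int.floordiv_lt_iff_lt_mul (by omega)).mpr (by omega)
        have h1' : (0:Int) ≤ PySem.Int.floordiv op base :=
          (PySem.Int.le_floordiv_iff_mul_le (by omega)).mpr (by omega)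
        omega
      rw [hfd, aLoop_zero]
      have hnd : bNdigits op base 64 1 = 1 :=
        nd_unique op base hb (by omega) (le_refl 1) hch.2.1 hch.2.2 (by simpa using h1) (by simpa using hlt)
      rw [hnd]
      simp [pdig_zero op base hb]
    · -- base ≤ op
      set q := PySem.Int.floordiv op base with hq
      have hq1 : (1:Int) ≤ q := (PySem.Int.le_floordiv_iff_mul_le (by omega)).mpr (by omega)
      have hqf : q < base ^ f := by
        have := (PySem.Int.floordiv_lt_iff_lt_mul (by omega : (0:Int) < base)).mpr
          (show op < base ^ f * base by rw [← pow_succ]; exact h2)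
        exact this
      have hq64 : q < base ^ 64 := lt_of_lt_of_le hqf (pow_le_pow_right₀ hb1 (by omega))
      have hchq := bN_spec q base hb 64 1 (le_refl 1) (by simpa using hq1) (by simpa using hq64)
      set nq := bNdigits q base 64 1 with hnq
      -- nd op = nq + 1
      have hlow : base ^ nq ≤ op := by
        have := (PySem.Int.le_floordiv_iff_mul_le (by omega : (0:Int) < base)).mp hchq.2.1
        calc base ^ nq = base ^ (nq - 1) * base := by
              rw [← pow_succ]; congr 1; omega
          _ ≤ op := this
      have hhigh : op < base ^ (nq + 1) := by
        have := (PySem.Int.floordiv_lt_iff_lt_mul (by omega : (0:Int) < base)).mp hchq.2.2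
        rw [pow_succ]; exact this
      have hnd : bNdigits op base 64 1 = nq + 1 :=
        nd_unique op base hb (by omega) (by omega) hch.2.1 hch.2.2 (by simpa using hlow) hhigh
      rw [hnd, ih q g' hq1 hqf (by omega) (by omega)]
      rw [List.range_succ_eq_map, List.map_cons, List.map_map]
      congr 1
      · rw [pdig_zero op base hb]
      · apply List.map_congr_left
        intro i _
        simp only [Function.comp_apply]
        exact (pdig_succ op base hb i).symm ▸ rfl

theorem pdig_high (op base : Int) (hb : 2 ≤ base) (h0 : 0 ≤ op) {i : Nat}
    (h : op < base ^ i) : pdig op base i = 0 := by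
  have hfd : PySem.Int.floordiv op (base ^ i) = 0 := by
    have hpos : (0:Int) < base ^ i := by positivity
    have hlt : PySem.Int.floordiv op (base ^ i) < 1 :=
      (PySem.Int.floordiv_lt_iff_lt_mul hpos).mpr (by omega)
    have hge : (0:Int) ≤ PySem.Int.floordiv op (base ^ i) :=
      (PySem.Int.le_floordiv_iff_mul_le hpos).mpr (by omega)
    omega
  simp [pdig, hfd, PySem.Int.mod]

theorem zfill_no_sign (c : Char) (rest : List Char) (w : Int)
    (h : ¬(c = '+' ∨ c = '-')) :
    PySem.Chars.zfill (c :: rest) w =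
      List.replicate (w.toNat - (c :: rest).length) '0' ++ (c :: rest) := by
  unfold PySem.Chars.zfill
  dsimp only
  split_ifs with h1
  · have h1' : w ≤ (rest.length : Int) + 1 := by simpa using h1
    have h2 : w.toNat - (c :: rest).length = 0 := by simp only [List.length_cons]; omega
    rw [h2]; simp
  · rfl

def dchar (d : Int) : Char :=
  if d = 0 then '0' else if d = 1 then '1' else '2'

theorem toChars_dchar (d : Int) (h0 : 0 ≤ d) (h3 : d < 3) :
    PySem.Int.toChars d = [dchar d] := by
  interval_cases d <;> decide

theorem dchar_not_sign (d : Int) : ¬(dchar d = '+' ∨ dchar d = '-') := by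
  unfold dchar; split_ifs <;> decide

theorem aSym_dchar (d : Int) (h0 : 0 ≤ d) (h3 : d < 3) : aSym (dchar d) = bSym d := by
  interval_cases d <;> decide

theorem flatten_singletons {α β : Type} (f : α → List β) (l : List α) (g : α → β)
    (h : ∀ x ∈ l, f x = [g x]) : (l.map f).flatten = l.map g := by
  induction l with
  | nil => rfl
  | cons a t ih =>
    simp only [List.map_cons, List.flatten_cons, h a (by simp),
      ih (fun x hx => h x (by simp [hx]))]
    rfl

theorem pdig_nonneg (op base : Int) (hb : 2 ≤ base) (i : Nat) : 0 ≤ pdig op base i :=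
  PySem.Int.mod_nonneg _ (by omega)

theorem pyRange_countdown_map {α : Type} (G : Int → α) (s : Int) (hs : 0 ≤ s) :
    (PySem.List.pyRange (s - 1) (-1) (-1)).map G
      = ((List.range s.toNat).reverse).map (fun (k : Nat) => G (↑k)) := by
  rw [PySem.List.pyRange_neg_one]
  have hlen : (s - 1 - -1).toNat = s.toNat := by omega
  rw [hlen]
  apply List.ext_getElem
  · simp
  · intro i h1 h2
    simp only [List.getElem_map, List.getElem_reverse, List.getElem_range,
      List.length_map, List.length_range, List.length_reverse] at h1 h2 ⊢
    congr 1
    push_cast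
    omega

theorem main_eq (operator nb_element base : Int)
    (hdom : operator ≤ 2147483648)
    (hpre : operator ≤ 0 ∨
      (2 ≤ base ∧ ∀ i ∈ List.range 32,
        PySem.Int.mod (PySem.Int.floordiv operator (base ^ i)) base < 3)) :
    convert_operator operator nb_element base = convert_operator_alt operator nb_element base := by
  by_cases hop : operator ≤ 0
  · -- operator <= 0: the loop body never runs, digits = [0], the output is all padding
    unfold convert_operator convert_operator_alt
    rw [if_pos hop, aLoop_nonpos base operator hop 64]
    simp only [if_true]
    have hrep : (([(0:Int)].reverse.map PySem.Int.toChars).flatten) = ['0'] := by decide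
    rw [hrep, zfill_no_sign '0' [] nb_element (by decide)]
    rw [List.map_append, List.map_replicate]
    show List.replicate (nb_element.toNat - 1) (aSym '0') ++ [aSym '0'] = _
    rw [← List.replicate_succ']
    have : nb_element.toNat - 1 + 1 = (max nb_element 1).toNat := by omega
    rw [this]
    rfl
  · -- 0 < operator: Pre_'s second disjunct applies
    rcases hpre with hop' | ⟨hb, hdig⟩
    · exact absurd hop' hop
    rw [not_le] at hop
    have hb1 : (1:Int) ≤ base := by omega
    have h2_32 : (2:Int) ^ 32 ≤ base ^ 32 := pow_le_pow_left₀ (by omega) hb 32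
    have hop32 : operator < base ^ 32 :=
      calc operator ≤ 2147483648 := hdom
        _ < (2:Int) ^ 32 := by norm_num
        _ ≤ base ^ 32 := h2_32
    have hop64 : operator < base ^ 64 := lt_of_lt_of_le hop32 (pow_le_pow_right₀ hb1 (by omega))
    set nd := bNdigits operator base 64 1 with hnd
    have hch := bN_spec operator base hb 64 1 (le_refl 1) (by simpa using hop) (by simpa using hop64)
    rw [← hnd] at hch
    have hnd1 : 1 ≤ nd := hch.1
    have hnd32 : nd ≤ 32 := by
      by_contra hcon
      push_neg at hcon
      have : base ^ 32 ≤ base ^ (nd - 1) := pow_le_pow_right₀ hb1 (by omega)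
      omega
    have hdigits : aLoop base 64 operator = (List.range nd).map (pdig operator base) :=
      aLoop_eq base hb 32 operator 64 hop hop32 (by omega) (by omega)
    have hbound : ∀ i, i < nd → 0 ≤ pdig operator base i ∧ pdig operator base i < 3 := by
      intro i hi
      exact ⟨pdig_nonneg operator base hb i, hdig i (List.mem_range.mpr (by omega))⟩
    -- A side
    unfold convert_operator
    rw [hdigits]
    have hne : (List.range nd).map (pdig operator base) ≠ [] := by
      simp [List.map_eq_nil_iff, List.range_eq_nil]; omega
    simp only [if_neg hne]
    have hmemc : ∀ d ∈ ((List.range nd).map (pdig operator base)).reverse,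
        PySem.Int.toChars d = [dchar d] := by
      intro d hd
      obtain ⟨i, hi, rfl⟩ := List.mem_map.mp (List.mem_reverse.mp hd)
      have hi' : i < nd := List.mem_range.mp hi
      exact toChars_dchar _ (hbound i hi').1 (hbound i hi').2
    have hrep1 : (((List.range nd).map (pdig operator base)).reverse.map PySem.Int.toChars).flatten
        = ((List.range nd).reverse).map (fun i => dchar (pdig operator base i)) := by
      rw [flatten_singletons PySem.Int.toChars _ (fun d => dchar d) hmemc,
        ← List.map_reverse, List.map_map]
      rfl
    rw [hrep1]
    -- cons form for zfill
    obtain ⟨c, rest, hcr⟩ : ∃ c rest,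
        ((List.range nd).reverse).map (fun i => dchar (pdig operator base i)) = c :: rest := by
      cases h : ((List.range nd).reverse).map (fun i => dchar (pdig operator base i)) with
      | nil => exfalso; have := congrArg List.length h; simp at this; omega
      | cons c rest => exact ⟨c, rest, rfl⟩
    have hc_not_sign : ¬(c = '+' ∨ c = '-') := by
      have hcmem : c ∈ ((List.range nd).reverse).map (fun i => dchar (pdig operator base i)) := by
        rw [hcr]; simp
      obtain ⟨i, _, hi⟩ := List.mem_map.mp hcmem
      rw [← hi]; exact dchar_not_sign _
    rw [hcr, zfill_no_sign c rest nb_element hc_not_sign, ← hcr]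
    have hlen : (((List.range nd).reverse).map (fun i => dchar (pdig operator base i))).length = nd := by
      simp
    rw [hlen, List.map_append, List.map_replicate]
    have hAtail : (((List.range nd).reverse).map (fun i => dchar (pdig operator base i))).map aSym
        = ((List.range nd).reverse).map (fun i => bSym (pdig operator base i)) := by
      rw [List.map_map]
      apply List.map_congr_left
      intro i hi
      have hi' : i < nd := List.mem_range.mp (List.mem_reverse.mp hi)
      exact aSym_dchar _ (hbound i hi').1 (hbound i hi').2
    rw [hAtail]
    have haSym0 : aSym '0' = "+" := by decide
    rw [haSym0]
    -- B side
    unfold convert_operator_alt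
    rw [if_neg (by omega)]
    simp only [← hnd]
    set span := max nb_element (nd : Int) with hspan
    have hspan1 : (1:Int) ≤ span := le_max_of_le_right (by exact_mod_cast hnd1)
    have hsN : span.toNat = max nb_element.toNat nd := by omega
    rw [pyRange_countdown_map _ span (by omega)]
    have hGB : (fun (k : Nat) =>
          bSym (PySem.Int.mod (PySem.Int.floordiv operator (base ^ ((k : Int)).toNat)) base))
        = fun (k : Nat) => bSym (pdig operator base k) := by
      funext k
      simp [pdig]
    rw [hGB]
    -- split the reversed range
    have hsplit : List.range span.toNat
        = List.range nd ++ (List.range (span.toNat - nd)).map (fun k => nd + k) := by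
      rw [← List.range_add]
      congr 1
      omega
    rw [hsplit, List.reverse_append, List.map_append]
    congr 1
    have : ∀ x ∈ ((List.range (span.toNat - nd)).map (fun k => nd + k)).reverse,
        bSym (pdig operator base x) = "+" := by
      intro x hx
      obtain ⟨k, _, hk⟩ := List.mem_map.mp (List.mem_reverse.mp hx)
      have hxn : nd ≤ x := by omega
      have : pdig operator base x = 0 :=
        pdig_high operator base hb (by omega)
          (lt_of_lt_of_le hch.2.2 (pow_le_pow_right₀ hb1 hxn))
      rw [this]; rfl
    rw [List.map_congr_left this, List.map_const']
    simp only [List.length_reverse, List.length_map, List.length_range]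
    congr 1
    omega

-- ===== VERDICT (by name: the statement is the Claim_ definition above) =====
theorem convert_operator_spec : Claim_equal_convert_operator := by
  intro operator nb_element base hdom hpre
  unfold Spec_convert_operator
  have hdom' : operator ≤ 2147483648 := by
    unfold Dom_convert_operator pvDomInt at hdom
    simp only [Bool.and_eq_true, decide_eq_true_eq] at hdom
    omega
  unfold Pre_convert_operator at hpre
  exact main_eq operator nb_element base hdom' hpre
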